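-- pv_equiv track=rewrite | github.com/miliar/Code_Jam_Webscraper | solutions_python/Problem_181/1557.py | produce_codeword
-- ===== SOURCE A (Python) =====
-- def produce_codeword(string):
--     if len(string) == 1:
--         return string[0]
--     elif len(string) == 0:
--         return ''
--
--     max_letter = max(string)
--
--     next_index = len(string) - string[::-1].index(max_letter) - 1
--
--     prefix = produce_codeword(string[:next_index])
--     suffix = "".join(string[next_index+1:])
--
--     return max_letter + prefix + suffix
-- ===== SOURCE B (Python) =====
-- def produce_codeword(string):
--     # One pass: chars that are >= every char before them (weak prefix maxima)
--     # come out reversed at the front; all other chars follow in original order.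
--     maxima = []
--     rest = []
--     cur = None
--     for ch in string:
--         if cur is None or ch >= cur:
--             maxima.append(ch)
--             cur = ch
--         else:
--             rest.append(ch)
--     return ''.join(reversed(maxima)) + ''.join(rest)
-- ===== Notes on version B (the rewrite author's own statement) =====
-- stated objective: faster
-- what changed: Replaced the recursive peel-last-max algorithm (each level rescans for max, index and slices) by a single left-to-right pass that splits the string into weak prefix-maxima (emitted reversed at the front) and the remaining characters in order.
import Mathlib
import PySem

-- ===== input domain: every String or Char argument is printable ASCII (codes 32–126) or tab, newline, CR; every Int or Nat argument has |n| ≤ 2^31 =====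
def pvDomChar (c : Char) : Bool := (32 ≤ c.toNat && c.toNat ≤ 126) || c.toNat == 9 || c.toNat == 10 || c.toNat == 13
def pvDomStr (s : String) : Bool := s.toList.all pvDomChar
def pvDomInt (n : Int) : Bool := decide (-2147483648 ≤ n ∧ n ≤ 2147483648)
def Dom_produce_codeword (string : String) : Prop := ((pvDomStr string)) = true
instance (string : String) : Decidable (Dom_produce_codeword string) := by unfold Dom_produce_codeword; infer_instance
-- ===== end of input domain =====

-- B replaces A's recursive peel-last-max (O(n^2)) by one linear pass splitting the
-- string into weak prefix-maxima (reversed at the front) and the rest in order.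

-- ===== PORT A =====
-- recursion over the character list of the string, step for step as in A
def pcA (l : List Char) : List Char :=
  if l.length = 1 then
    match PySem.List.pyGet? l 0 with            -- string[0]
    | some c => [c]
    | none => []                                 -- unreachable: length = 1
  else if l.length = 0 then []
  else
    match PySem.List.max? l (fun x => x) with  -- max(string)
    | none => []                                 -- unreachable: length ≥ 2
    | some m =>
      match PySem.List.index? ((PySem.List.slice? l none none (-1)).getD []) m with
                                                 -- string[::-1].index(max_letter)
      | none => []                               -- unreachable: m ∈ l
      | some k =>
        let ni : Nat := l.length - k - 1         -- next_index
        m :: pcA (PySem.List.slice l none (some (ni : Int)))  -- produce_codeword(string[:next_index])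
          ++ PySem.List.slice l (some ((ni : Int) + 1)) none  -- string[next_index+1:]
termination_by l.length
decreasing_by
  simp only [PySem.List.slice_to_natCast, List.length_take]
  omega

def produce_codeword (string : String) : String := String.ofList (pcA string.toList)

-- ===== PORT B =====
-- one foldl over the characters: state = (maxima so far, rest so far, current max)
def pcBstep (s : List Char × List Char × Option Char) (ch : Char) : List Char × List Char × Option Char :=
  match s with
  | (mx, rest, cur) =>
    match cur with
    | none => (mx ++ [ch], rest, some ch)
    | some c => if c ≤ ch then (mx ++ [ch], rest, some ch) else (mx, rest ++ [ch], some c)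

def produce_codeword_alt (string : String) : String :=
  match string.toList.foldl pcBstep ([], [], none) with
  | (mx, rest, _) => String.ofList (mx.reverse ++ rest)

-- ===== PRECONDITION & SPEC =====
def Spec_produce_codeword (string : String) (out : String) : Prop := out = produce_codeword_alt string
instance (string : String) (out : String) : Decidable (Spec_produce_codeword string out) := by unfold Spec_produce_codeword; infer_instance

-- ===== CLAIM (what is proved, stated in full; the proofs are below) =====
def Claim_equal_produce_codeword : Prop := ∀ (string : String), Dom_produce_codeword string → Spec_produce_codeword string (produce_codeword string)

-- ===== LEMMAS AND PROOFS =====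

-- whether ch is accepted as a new running maximum
def pcCond (cur : Option Char) (ch : Char) : Bool :=
  match cur with
  | none => true
  | some c => decide (c ≤ ch)

def pcNew (cur : Option Char) (ch : Char) : Option Char :=
  if pcCond cur ch then some ch else cur

-- recursive characterization of the fold's two accumulated lists
def pcSplit : List Char → Option Char → List Char × List Char
  | [], _ => ([], [])
  | ch :: t, cur =>
    let p := pcSplit t (pcNew cur ch)
    if pcCond cur ch then (ch :: p.1, p.2) else (p.1, ch :: p.2)

def pcAfter (l : List Char) (cur : Option Char) : Option Char :=
  l.foldl pcNew cur

def pcOut (l : List Char) : List Char :=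
  (pcSplit l none).1.reverse ++ (pcSplit l none).2

theorem pcBstep_eq (mx rest : List Char) (cur : Option Char) (ch : Char) :
    pcBstep (mx, rest, cur) ch =
      (if pcCond cur ch then (mx ++ [ch], rest, some ch) else (mx, rest ++ [ch], cur)) := by
  cases cur <;> simp [pcBstep, pcCond]

theorem foldl_pcBstep (l : List Char) : ∀ (mx rest : List Char) (cur : Option Char),
    l.foldl pcBstep (mx, rest, cur) =
      (mx ++ (pcSplit l cur).1, rest ++ (pcSplit l cur).2, pcAfter l cur) := by
  induction l with
  | nil => intro mx rest cur; simp [pcSplit, pcAfter]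
  | cons ch t ih =>
    intro mx rest cur
    simp only [List.foldl_cons, pcBstep_eq, pcSplit, pcAfter, List.foldl_cons]
    by_cases h : pcCond cur ch = true
    · simp [h, ih, pcNew, pcAfter]
    · simp only [Bool.not_eq_true] at h
      simp [h, ih, pcNew, pcAfter]

theorem pcAfter_cases (l : List Char) : ∀ cur, pcAfter l cur = cur ∨ ∃ c ∈ l, pcAfter l cur = some c := by
  induction l with
  | nil => intro cur; left; rfl
  | cons ch t ih =>
    intro cur
    have : pcAfter (ch :: t) cur = pcAfter t (pcNew cur ch) := rfl
    rw [this]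
    rcases ih (pcNew cur ch) with h | ⟨c, hc, h⟩
    · rw [h]; unfold pcNew; split
      · right; exact ⟨ch, by simp, rfl⟩
      · left; rfl
    · right; exact ⟨c, by simp [hc], h⟩

theorem pcSplit_append (a : List Char) : ∀ (b : List Char) (cur : Option Char),
    pcSplit (a ++ b) cur =
      ((pcSplit a cur).1 ++ (pcSplit b (pcAfter a cur)).1,
       (pcSplit a cur).2 ++ (pcSplit b (pcAfter a cur)).2) := by
  induction a with
  | nil => intro b cur; simp [pcSplit, pcAfter]
  | cons ch t ih =>
    intro b cur
    have hA : pcAfter (ch :: t) cur = pcAfter t (pcNew cur ch) := rfl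
    simp only [List.cons_append, pcSplit, hA, ih]
    by_cases h : pcCond cur ch = true <;> simp [h]

theorem pcSplit_all_lt (b : List Char) (m : Char) (hb : ∀ x ∈ b, x < m) :
    pcSplit b (some m) = ([], b) := by
  induction b with
  | nil => rfl
  | cons ch t ih =>
    have hch : ch < m := hb ch (by simp)
    have hc : pcCond (some m) ch = false := by
      simp [pcCond]; exact hch
    have hn : pcNew (some m) ch = some m := by simp [pcNew, hc]
    simp [pcSplit, hn, hc, ih (fun x hx => hb x (by simp [hx]))]

theorem pcA_eq_out : ∀ (n : Nat) (l : List Char), l.length ≤ n → pcA l = pcOut l := by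
  intro n
  induction n with
  | zero =>
    intro l hl
    have : l = [] := List.eq_nil_of_length_eq_zero (Nat.le_zero.mp hl)
    subst this; rw [pcA]; rfl
  | succ n ih =>
    intro l hl
    rw [pcA]
    by_cases h1 : l.length = 1
    · match l, h1 with
      | [c], _ => simp [PySem.List.pyGet?, PySem.List.pyIdx?, pcOut, pcSplit, pcCond]
    · by_cases h0 : l.length = 0
      · have : l = [] := List.eq_nil_of_length_eq_zero h0
        subst this; rfl
      · simp only [h1, h0, if_false]
        -- l has length ≥ 2
        rcases hmx : PySem.List.max? l (fun x => x) with _ | m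
        · exact absurd ((PySem.List.max?_eq_none_iff l (fun x => x)).mp hmx)
            (fun h => h0 (by rw [h]; rfl))
        · have hmem : m ∈ l := PySem.List.max?_mem hmx
          have hmax : ∀ y ∈ l, y ≤ m := by
            intro y hy; exact PySem.List.max?_isMax hmx y hy
          have hrev : (PySem.List.slice? l none none (-1)).getD [] = l.reverse := by
            rw [PySem.List.slice?_none_none_neg_one]; rfl
          rw [hrev]
          rcases hidx : PySem.List.index? l.reverse m with _ | k
          · exact absurd ((PySem.List.index?_eq_none_iff l.reverse m).mp hidx)
              (by simp [hmem])
          · -- decompose: l.reverse = pre ++ m :: suf with m ∉ pre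
            obtain ⟨pre, suf, hsplit, hlen, hnot⟩ :=
              (PySem.List.index?_eq_some_iff l.reverse m k).mp hidx
            have hlrev : l = suf.reverse ++ m :: pre.reverse := by
              have := congrArg List.reverse hsplit
              simpa using this
            have hlenl : l.length = suf.length + pre.length + 1 := by
              rw [hlrev]; simp; omega
            have hni : l.length - k - 1 = suf.length := by omega
            simp only [hidx, hni]
            have htake : PySem.List.slice l none (some ((suf.length : Nat) : Int)) = suf.reverse := by
              rw [PySem.List.slice_to_natCast, hlrev]
              rw [List.take_append_of_le_length (by simp)]
              simp
            have hdrop : PySem.List.slice l (some (((suf.length : Nat) : Int) + 1)) none = pre.reverse := by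
              have : ((suf.length : Nat) : Int) + 1 = (((suf.length + 1 : Nat)) : Int) := by push_cast; ring
              rw [this, PySem.List.slice_from_natCast, hlrev]
              rw [show suf.length + 1 = suf.reverse.length + 1 by simp, List.drop_append]
              simp
            rw [htake, hdrop]
            -- B's split on the same decomposition
            have hIH : pcA suf.reverse = pcOut suf.reverse := by
              apply ih
              have : suf.reverse.length ≤ l.length - 1 := by
                simp [hlenl]
              omega
            rw [hIH]
            -- compute pcSplit l none via the decomposition
            have hcond : pcCond (pcAfter suf.reverse none) m = true := by
              rcases pcAfter_cases suf.reverse none with h | ⟨c, hc, h⟩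
              · rw [h]; rfl
              · rw [h]; simp [pcCond]
                exact hmax c (by rw [hlrev]; simp [List.mem_reverse.mp hc])
            have hnew : pcNew (pcAfter suf.reverse none) m = some m := by
              simp [pcNew, hcond]
            have hpre_lt : ∀ x ∈ pre.reverse, x < m := by
              intro x hx
              have hxl : x ∈ l := by rw [hlrev]; simp [hx]
              exact lt_of_le_of_ne (hmax x hxl)
                (fun he => hnot (he ▸ List.mem_reverse.mp hx))
            have hsplitl : pcSplit l none =
                ((pcSplit suf.reverse none).1 ++ [m],
                 (pcSplit suf.reverse none).2 ++ pre.reverse) := by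
              rw [hlrev, pcSplit_append]
              have : pcSplit (m :: pre.reverse) (pcAfter suf.reverse none) =
                  ([m], pre.reverse) := by
                simp only [pcSplit, hcond, hnew, if_true]
                rw [pcSplit_all_lt pre.reverse m hpre_lt]
              rw [this]
            unfold pcOut
            rw [hsplitl]
            simp

-- ===== VERDICT (by name: the statement is the Claim_ definition above) =====
theorem produce_codeword_spec : Claim_equal_produce_codeword := by
  intro s _
  show produce_codeword s = produce_codeword_alt s
  unfold produce_codeword produce_codeword_alt
  rw [foldl_pcBstep]
  simp [pcA_eq_out s.toList.length s.toList le_rfl, pcOut]
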